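-- pv_equiv track=rewrite | github.com/AustenHsiao/AIFiles | 8-Queen_Hsiao.py | single_fitness
-- ===== SOURCE A (Python) =====
-- def single_fitness(chromosome):
--     # we won't have any attacking queens from the top or bottom, so we only have to consider
--     # if queens are on the same rows. This will be the starting point for our fitness.
--     # A set of 8 numbers has 28 distinct pairs (8 choose 2), so a perfect board will have
--     # a fitness of 28
--     fitness = 28 - (len(chromosome) - len(set(chromosome)))
--
--     # Then we have to consider diagonal attacks. For each queen, figure out if there are queens
--     # +/-1 1 column away, +/-2 2 columns away... etc.. We only have to figure out the number of attacking
--     # queens from columns left to right since we're counting pairs. We also need a way to stop counting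
--     # if the attacker is shielded by a previous attacker-- this is why I have close_bot and close_top.
--     for i in range(8):
--         close_bot = 0
--         close_top = 0
--         for right_attacker in range(i+1, 8):
--             if close_top == 1 and close_bot == 1:
--                 break
--             if chromosome[right_attacker] == chromosome[i] + (right_attacker - i) and close_top == 0:
--                 fitness -= 1
--                 close_top = 1
--             if chromosome[right_attacker] == chromosome[i] - (right_attacker - i) and close_bot == 0:
--                 fitness -= 1
--                 close_bot = 1
--     return fitness
-- ===== SOURCE B (Python) =====
-- def single_fitness(chromosome):
--     # Row clashes exactly as the original; each occupied diagonal with c queens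
--     # costs c-1 points, i.e. per direction: 8 minus the number of distinct diagonals.
--     fitness = 28 - (len(chromosome) - len(set(chromosome)))
--     up = {chromosome[k] - k for k in range(8)}
--     down = {chromosome[k] + k for k in range(8)}
--     return fitness - (8 - len(up)) - (8 - len(down))
-- ===== Notes on version B (the rewrite author's own statement) =====
-- stated objective: simpler
-- what changed: Replaces the nested shielded nearest-attacker scan (close_top/close_bot flags with break) by counting distinct up- and down-diagonal keys chromosome[k]-k and chromosome[k]+k with two set comprehensions, subtracting 8 minus the number of distinct keys per direction.
import Mathlib
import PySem

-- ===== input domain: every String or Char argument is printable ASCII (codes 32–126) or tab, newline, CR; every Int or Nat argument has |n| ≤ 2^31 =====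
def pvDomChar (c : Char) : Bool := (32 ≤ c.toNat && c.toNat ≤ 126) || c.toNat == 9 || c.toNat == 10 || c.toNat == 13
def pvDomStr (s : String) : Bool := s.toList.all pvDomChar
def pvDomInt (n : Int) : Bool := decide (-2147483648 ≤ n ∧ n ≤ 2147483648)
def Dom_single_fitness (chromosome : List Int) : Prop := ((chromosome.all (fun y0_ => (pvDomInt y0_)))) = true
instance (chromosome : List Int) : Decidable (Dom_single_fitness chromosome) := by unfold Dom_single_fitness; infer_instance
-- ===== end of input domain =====

-- B replaces A's shielded nearest-attacker double loop by counting distinct diagonal keys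
-- (each occupied diagonal with c queens costs c-1): simpler, one pass per direction.

-- ===== PORT A =====
-- inner 'for right_attacker in range(i+1, 8)' loop with break, state (fitness, close_bot, close_top)
def innerA (c : List Int) (i : Int) : List Int → Int × Int × Int → Int × Int × Int
  | [], st => st
  | j :: rest, (fitness, close_bot, close_top) =>
    if close_top == 1 && close_bot == 1 then (fitness, close_bot, close_top)
    else
      let p1 := if PySem.List.pyGetD c j 0 == PySem.List.pyGetD c i 0 + (j - i) && close_top == 0
                then (fitness - 1, (1 : Int)) else (fitness, close_top)
      let p2 := if PySem.List.pyGetD c j 0 == PySem.List.pyGetD c i 0 - (j - i) && close_bot == 0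
                then (p1.1 - 1, (1 : Int)) else (p1.1, close_bot)
      innerA c i rest (p2.1, p2.2, p1.2)

def single_fitness (chromosome : List Int) : Int :=
  let fitness : Int := 28 - ((chromosome.length : Int) - ((PySem.Set.ofList chromosome).length : Int))
  (PySem.List.pyRange 0 8 1).foldl
    (fun fitness i => (innerA chromosome i (PySem.List.pyRange (i+1) 8 1) (fitness, 0, 0)).1)
    fitness

-- ===== PORT B =====
def single_fitness_alt (chromosome : List Int) : Int :=
  let fitness : Int := 28 - ((chromosome.length : Int) - ((PySem.Set.ofList chromosome).length : Int))
  let up : PySem.Set Int :=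
    PySem.Set.ofList ((PySem.List.pyRange 0 8 1).map (fun k => PySem.List.pyGetD chromosome k 0 - k))
  let down : PySem.Set Int :=
    PySem.Set.ofList ((PySem.List.pyRange 0 8 1).map (fun k => PySem.List.pyGetD chromosome k 0 + k))
  fitness - (8 - (up.length : Int)) - (8 - (down.length : Int))

-- ===== PRECONDITION & SPEC =====
-- A indexes chromosome[0..7] and raises IndexError on shorter lists (B raises there too).
def Pre_single_fitness (chromosome : List Int) : Prop := 8 ≤ chromosome.length
instance (chromosome : List Int) : Decidable (Pre_single_fitness chromosome) := by
  unfold Pre_single_fitness; infer_instance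
def pvWitness_single_fitness : List Int := [0, 1, 2, 3, 4, 5, 6, 7]

def Spec_single_fitness (chromosome : List Int) (out : Int) : Prop := out = single_fitness_alt chromosome
instance (chromosome : List Int) (out : Int) : Decidable (Spec_single_fitness chromosome out) := by unfold Spec_single_fitness; infer_instance

-- ===== CLAIM (what is proved, stated in full; the proofs are below) =====
def Claim_equal_single_fitness : Prop := ∀ (chromosome : List Int), Dom_single_fitness chromosome → Pre_single_fitness chromosome → Spec_single_fitness chromosome (single_fitness chromosome)

-- ===== LEMMAS AND PROOFS =====

-- count of positions that have an equal element later in the list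
def countLaterDup : List Int → Int
  | [] => 0
  | x :: t => (if x ∈ t then 1 else 0) + countLaterDup t

-- closed form of the inner loop: one point per direction iff some later column attacks
theorem innerA_spec (c : List Int) (i : Int) : ∀ (L : List Int) (f cb ct : Int),
    (innerA c i L (f, cb, ct)).1 =
      f - (if ct = 0 ∧ L.any (fun j => PySem.List.pyGetD c j 0 == PySem.List.pyGetD c i 0 + (j - i)) = true then 1 else 0)
        - (if cb = 0 ∧ L.any (fun j => PySem.List.pyGetD c j 0 == PySem.List.pyGetD c i 0 - (j - i)) = true then 1 else 0) := by
  intro L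
  induction L with
  | nil => intro f cb ct; simp [innerA]
  | cons j rest ih =>
    intro f cb ct
    by_cases hJ : j = i
    · subst hJ
      by_cases hct0 : ct = 0 <;> by_cases hct1 : ct = 1 <;>
      by_cases hcb0 : cb = 0 <;> by_cases hcb1 : cb = 1 <;>
        simp [innerA, List.any_cons, *]
    · have hC : PySem.List.pyGetD c i 0 + (j - i) ≠ PySem.List.pyGetD c i 0 - (j - i) := by omega
      have hC' : PySem.List.pyGetD c i 0 - (j - i) ≠ PySem.List.pyGetD c i 0 + (j - i) := Ne.symm hC
      by_cases hct0 : ct = 0 <;> by_cases hct1 : ct = 1 <;>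
      by_cases hcb0 : cb = 0 <;> by_cases hcb1 : cb = 1 <;>
      by_cases hT : PySem.List.pyGetD c j 0 = PySem.List.pyGetD c i 0 + (j - i) <;>
      by_cases hB : PySem.List.pyGetD c j 0 = PySem.List.pyGetD c i 0 - (j - i) <;>
        simp [innerA, List.any_cons, *] <;>
        split_ifs <;> omega

theorem foldl_sub (t b : Int → Int) : ∀ (R : List Int) (f0 : Int),
    R.foldl (fun f i => f - t i - b i) f0 = f0 - (R.map t).sum - (R.map b).sum := by
  intro R
  induction R with
  | nil => simp
  | cons x xs ih => intro f0; simp [ih]; ring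

theorem sumInd (key : Int → Int) (b : Int) : ∀ (n : Nat) (a : Int), (b - a).toNat = n →
    ((PySem.List.pyRange a b 1).map
        (fun i => if ((PySem.List.pyRange (i+1) b 1).any (fun j => key j == key i)) = true then (1:Int) else 0)).sum
      = countLaterDup ((PySem.List.pyRange a b 1).map key) := by
  intro n
  induction n with
  | zero =>
    intro a ha
    rw [PySem.List.pyRange_one_eq_nil (by omega)]
    simp [countLaterDup]
  | succ m ih =>
    intro a ha
    rw [PySem.List.pyRange_one_cons (by omega : a < b)]
    simp only [List.map_cons, List.sum_cons, countLaterDup]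
    rw [ih (a + 1) (by omega)]
    have hmem : ((PySem.List.pyRange (a+1) b 1).any (fun j => key j == key a)) = true ↔
        (key a ∈ (PySem.List.pyRange (a+1) b 1).map key) := by
      rw [List.any_eq_true, List.mem_map]
      simp only [beq_iff_eq]
    rw [if_congr hmem rfl rfl]

theorem len_ofList (l : List Int) : (PySem.Set.ofList l).length = l.toFinset.card := by
  have hn : (PySem.Set.ofList l).Nodup := PySem.Set.nodup_ofList l
  have he : (PySem.Set.ofList l).toFinset = l.toFinset := by
    ext x; simp [List.mem_toFinset, PySem.Set.mem_ofList]
  rw [← he, List.toFinset_card_of_nodup hn]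

theorem core (l : List Int) : countLaterDup l + (l.toFinset.card : Int) = l.length := by
  induction l with
  | nil => simp [countLaterDup]
  | cons x t ih =>
    simp only [countLaterDup, List.toFinset_cons, List.length_cons]
    by_cases hx : x ∈ t
    · rw [Finset.insert_eq_self.mpr (List.mem_toFinset.mpr hx)]
      simp only [if_pos hx]
      push_cast
      omega
    · rw [Finset.card_insert_of_notMem (by simpa using hx)]
      simp only [if_neg hx]
      push_cast
      omega

theorem main_eq (c : List Int) : single_fitness c = single_fitness_alt c := by
  unfold single_fitness single_fitness_alt
  simp only []
  have hstepfun :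
      (fun (fitness i : Int) => (innerA c i (PySem.List.pyRange (i+1) 8 1) (fitness, 0, 0)).1)
      = (fun (fitness i : Int) => fitness
          - (if ((PySem.List.pyRange (i+1) 8 1).any
                (fun j => (PySem.List.pyGetD c j 0 - j) == (PySem.List.pyGetD c i 0 - i))) = true
             then 1 else 0)
          - (if ((PySem.List.pyRange (i+1) 8 1).any
                (fun j => (PySem.List.pyGetD c j 0 + j) == (PySem.List.pyGetD c i 0 + i))) = true
             then 1 else 0)) := by
    funext f i
    rw [innerA_spec c i _ f 0 0]
    have e1 : ((PySem.List.pyRange (i+1) 8 1).any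
          (fun j => PySem.List.pyGetD c j 0 == PySem.List.pyGetD c i 0 + (j - i)))
        = ((PySem.List.pyRange (i+1) 8 1).any
          (fun j => (PySem.List.pyGetD c j 0 - j) == (PySem.List.pyGetD c i 0 - i))) := by
      congr 1
      funext j
      by_cases h : PySem.List.pyGetD c j 0 = PySem.List.pyGetD c i 0 + (j - i)
      · have h2 : PySem.List.pyGetD c j 0 - j = PySem.List.pyGetD c i 0 - i := by omega
        rw [beq_iff_eq.mpr h, beq_iff_eq.mpr h2]
      · have h2 : PySem.List.pyGetD c j 0 - j ≠ PySem.List.pyGetD c i 0 - i := by omega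
        rw [beq_eq_false_iff_ne.mpr h, beq_eq_false_iff_ne.mpr h2]
    have e2 : ((PySem.List.pyRange (i+1) 8 1).any
          (fun j => PySem.List.pyGetD c j 0 == PySem.List.pyGetD c i 0 - (j - i)))
        = ((PySem.List.pyRange (i+1) 8 1).any
          (fun j => (PySem.List.pyGetD c j 0 + j) == (PySem.List.pyGetD c i 0 + i))) := by
      congr 1
      funext j
      by_cases h : PySem.List.pyGetD c j 0 = PySem.List.pyGetD c i 0 - (j - i)
      · have h2 : PySem.List.pyGetD c j 0 + j = PySem.List.pyGetD c i 0 + i := by omega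
        rw [beq_iff_eq.mpr h, beq_iff_eq.mpr h2]
      · have h2 : PySem.List.pyGetD c j 0 + j ≠ PySem.List.pyGetD c i 0 + i := by omega
        rw [beq_eq_false_iff_ne.mpr h, beq_eq_false_iff_ne.mpr h2]
    rw [e1, e2, if_congr (and_iff_right rfl) rfl rfl, if_congr (and_iff_right rfl) rfl rfl]
  rw [hstepfun, foldl_sub
    (fun i => if ((PySem.List.pyRange (i+1) 8 1).any
        (fun j => (PySem.List.pyGetD c j 0 - j) == (PySem.List.pyGetD c i 0 - i))) = true then (1:Int) else 0)
    (fun i => if ((PySem.List.pyRange (i+1) 8 1).any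
        (fun j => (PySem.List.pyGetD c j 0 + j) == (PySem.List.pyGetD c i 0 + i))) = true then (1:Int) else 0)]
  rw [show (fun i => if ((PySem.List.pyRange (i+1) 8 1).any
        (fun j => (PySem.List.pyGetD c j 0 - j) == (PySem.List.pyGetD c i 0 - i))) = true then (1:Int) else 0)
      = (fun i => if ((PySem.List.pyRange (i+1) 8 1).any
        (fun j => (fun x => PySem.List.pyGetD c x 0 - x) j == (fun x => PySem.List.pyGetD c x 0 - x) i)) = true then (1:Int) else 0) from rfl]
  rw [show (fun i => if ((PySem.List.pyRange (i+1) 8 1).any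
        (fun j => (PySem.List.pyGetD c j 0 + j) == (PySem.List.pyGetD c i 0 + i))) = true then (1:Int) else 0)
      = (fun i => if ((PySem.List.pyRange (i+1) 8 1).any
        (fun j => (fun x => PySem.List.pyGetD c x 0 + x) j == (fun x => PySem.List.pyGetD c x 0 + x) i)) = true then (1:Int) else 0) from rfl]
  rw [sumInd (fun x => PySem.List.pyGetD c x 0 - x) 8 8 0 (by decide),
      sumInd (fun x => PySem.List.pyGetD c x 0 + x) 8 8 0 (by decide)]
  have c1 := core ((PySem.List.pyRange 0 8 1).map (fun x => PySem.List.pyGetD c x 0 - x))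
  have c2 := core ((PySem.List.pyRange 0 8 1).map (fun x => PySem.List.pyGetD c x 0 + x))
  rw [← len_ofList] at c1 c2
  have hlen1 : ((PySem.List.pyRange 0 8 1).map (fun x => PySem.List.pyGetD c x 0 - x)).length = 8 := by
    simp [PySem.List.length_pyRange_one]
  have hlen2 : ((PySem.List.pyRange 0 8 1).map (fun x => PySem.List.pyGetD c x 0 + x)).length = 8 := by
    simp [PySem.List.length_pyRange_one]
  rw [hlen1] at c1
  rw [hlen2] at c2
  omega

-- ===== VERDICT (by name: the statement is the Claim_ definition above) =====
theorem single_fitness_spec : Claim_equal_single_fitness := by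
  intro c _ _
  unfold Spec_single_fitness
  exact main_eq c
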